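-- pv_equiv track=rewrite | github.com/Sanjaysrinivas/Prompt-Automata | src/app/models/reference_models.py | _contains_common_patterns
-- ===== SOURCE A (Python) =====
-- def _contains_common_patterns(key: str) -> bool:
--     """Check if the key contains common patterns that would make it weak.
--
--     Args:
--         key: The key to check
--
--     Returns:
--         bool: True if common patterns are found, False otherwise
--     """
--     for i in range(len(key) - 3):
--         if len(set(key[i : i + 4])) == 1:
--             return True
--
--     sequences = [
--         "abcdefghijklmnopqrstuvwxyz",
--         "ABCDEFGHIJKLMNOPQRSTUVWXYZ",
--         "0123456789",
--     ]
--
--     for seq in sequences: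
--         for i in range(len(seq) - 3):
--             if seq[i : i + 4].lower() in key.lower():
--                 return True
--
--     keyboard_patterns = ["qwertyuiop", "asdfghjkl", "zxcvbnm"]
--
--     for pattern in keyboard_patterns:
--         for i in range(len(pattern) - 3):
--             if pattern[i : i + 4].lower() in key.lower():
--                 return True
--
--     return False
-- ===== SOURCE B (Python) =====
-- # One pass over the key's 4-char windows with a precomputed forbidden-4-gram set
-- # (the uppercase alphabet lowers to the same 4-grams as the lowercase one, so the
-- # five lowercase sources generate exactly the same forbidden set).
-- _SOURCES = (
--     "abcdefghijklmnopqrstuvwxyz",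
--     "0123456789",
--     "qwertyuiop",
--     "asdfghjkl",
--     "zxcvbnm",
-- )
-- FORBIDDEN = frozenset(s[i : i + 4] for s in _SOURCES for i in range(len(s) - 3))
--
--
-- def _contains_common_patterns(key: str) -> bool:
--     kl = key.lower()
--     for i in range(len(key) - 3):
--         if len(set(key[i : i + 4])) == 1 or kl[i : i + 4] in FORBIDDEN:
--             return True
--     return False
-- ===== Notes on version B (the rewrite author's own statement) =====
-- stated objective: idiomatic
-- what changed: Replaces A's run-scan pass plus six nested pattern-substring scans with a single pass over the key's 4-char windows checked against one precomputed frozenset of forbidden 4-grams.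
import Mathlib
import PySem

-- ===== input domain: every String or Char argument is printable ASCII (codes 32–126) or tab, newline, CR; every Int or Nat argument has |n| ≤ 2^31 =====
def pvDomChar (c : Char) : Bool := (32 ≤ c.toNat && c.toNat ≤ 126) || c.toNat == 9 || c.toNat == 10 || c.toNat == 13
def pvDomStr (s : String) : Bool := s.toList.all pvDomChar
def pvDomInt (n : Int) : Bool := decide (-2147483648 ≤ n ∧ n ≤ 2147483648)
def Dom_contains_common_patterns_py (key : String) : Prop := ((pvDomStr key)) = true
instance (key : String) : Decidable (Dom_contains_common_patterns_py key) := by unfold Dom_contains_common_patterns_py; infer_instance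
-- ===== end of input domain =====

-- B replaces A's run-scan pass plus six nested pattern-substring scans with one pass
-- over the key's 4-char windows checked against a precomputed forbidden-4-gram set.

-- ===== PORT A =====
def contains_common_patterns_py (key : String) : Bool :=
  let K := key.toList
  -- for i in range(len(key) - 3): if len(set(key[i:i+4])) == 1: return True
  if (PySem.List.pyRange 0 ((K.length : Int) - 3)).any (fun i =>
       PySem.Set.len (PySem.Set.ofList (PySem.List.slice K (some i) (some (i + 4)))) == 1)
  then true
  else
    let sequences : List (List Char) :=
      ["abcdefghijklmnopqrstuvwxyz".toList, "ABCDEFGHIJKLMNOPQRSTUVWXYZ".toList,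
       "0123456789".toList]
    -- for seq in sequences: for i in range(len(seq)-3): if seq[i:i+4].lower() in key.lower(): return True
    if sequences.any (fun seq =>
         (PySem.List.pyRange 0 ((seq.length : Int) - 3)).any (fun i =>
           PySem.Chars.isIn (PySem.Chars.lower (PySem.List.slice seq (some i) (some (i + 4))))
             (PySem.Chars.lower K)))
    then true
    else
      let keyboard_patterns : List (List Char) :=
        ["qwertyuiop".toList, "asdfghjkl".toList, "zxcvbnm".toList]
      keyboard_patterns.any (fun pat =>
        (PySem.List.pyRange 0 ((pat.length : Int) - 3)).any (fun i =>
          PySem.Chars.isIn (PySem.Chars.lower (PySem.List.slice pat (some i) (some (i + 4))))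
            (PySem.Chars.lower K)))

-- ===== PORT B =====
-- the five lowercase source strings (the uppercase alphabet lowers to the lowercase one)
def pvSources : List (List Char) :=
  ["abcdefghijklmnopqrstuvwxyz".toList, "0123456789".toList,
   "qwertyuiop".toList, "asdfghjkl".toList, "zxcvbnm".toList]

def pvGrams : List (List Char) :=
  pvSources.flatMap (fun s => (List.range (s.length - 3)).map (fun i => (s.drop i).take 4))

-- FORBIDDEN = frozenset(...): the precomputed set of weak 4-grams
def pvForbidden : PySem.Set (List Char) := PySem.Set.ofList pvGrams

def contains_common_patterns_py_alt (key : String) : Bool :=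
  let K := key.toList
  let kl := PySem.Chars.lower K
  (List.range (K.length - 3)).any (fun i =>
    PySem.Set.len (PySem.Set.ofList ((K.drop i).take 4)) == 1 ||
    PySem.Set.contains pvForbidden ((kl.drop i).take 4))

-- ===== PRECONDITION & SPEC =====
def Spec_contains_common_patterns_py (key : String) (out : Bool) : Prop := out = contains_common_patterns_py_alt key
instance (key : String) (out : Bool) : Decidable (Spec_contains_common_patterns_py key out) := by unfold Spec_contains_common_patterns_py; infer_instance

-- ===== CLAIM (what is proved, stated in full; the proofs are below) =====
def Claim_equal_contains_common_patterns_py : Prop := ∀ (key : String), Dom_contains_common_patterns_py key → Spec_contains_common_patterns_py key (contains_common_patterns_py key)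

-- ===== LEMMAS AND PROOFS =====

-- any over pyRange 0 (n - 3) is any over range (n - 3)
theorem pv_pyRangeAny_sub3 (n : Nat) (f : Int → Bool) :
    (PySem.List.pyRange 0 ((n : Int) - 3)).any f = (List.range (n - 3)).any (fun k => f (k : Int)) := by
  by_cases h : 3 ≤ n
  · have e : (n : Int) - 3 = ((n - 3 : Nat) : Int) := by omega
    rw [e, PySem.List.pyRange_zero_natCast]
    simp
    rfl
  · have h0 : n - 3 = 0 := by omega
    rw [h0]
    simp [PySem.List.pyRange, show ¬(3 < n) by omega]

-- xs[i:i+4] with a Nat index is drop/take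
theorem pv_slice4 {α : Type} (xs : List α) (i : Nat) :
    PySem.List.slice xs (some (i : Int)) (some ((i : Int) + 4)) = (xs.drop i).take 4 := by
  have h := PySem.List.slice_natCast_add xs i 4
  simpa using h

-- 'g in l' for a 4-gram g holds iff some 4-char window of l equals g
theorem pv_isIn_window (g l : List Char) (hg : g.length = 4) :
    PySem.Chars.isIn g l = true ↔ ∃ i < l.length - 3, (l.drop i).take 4 = g := by
  rw [PySem.Chars.isIn_iff_infix]
  constructor
  · rintro ⟨s, t, rfl⟩
    refine ⟨s.length, ?_, ?_⟩
    · simp [List.length_append, hg]; omega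
    · rw [List.append_assoc, List.drop_left, ← hg, List.take_left]
  · rintro ⟨i, hi, rfl⟩
    exact ((l.drop i).take_prefix 4).isInfix.trans (l.drop_suffix i).isInfix

-- Bool: an early 'return True' folds into or
theorem pv_if_or (c b : Bool) : (if c = true then true else b) = (c || b) := by
  cases c <;> simp

theorem pv_any_or {α : Type} (l : List α) (p q : α → Bool) :
    l.any (fun x => p x || q x) = (l.any p || l.any q) := by
  induction l with
  | nil => rfl
  | cons a t ih =>
    simp only [List.any_cons, ih]
    ac_rfl

-- A's lowered pattern windows, in A's scan order (range/drop-take form)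
def pvGramsA : List (List Char) :=
  (["abcdefghijklmnopqrstuvwxyz".toList, "ABCDEFGHIJKLMNOPQRSTUVWXYZ".toList,
    "0123456789".toList, "qwertyuiop".toList, "asdfghjkl".toList, "zxcvbnm".toList]).flatMap
    (fun s => (List.range (s.length - 3)).map (fun i => PySem.Chars.lower ((s.drop i).take 4)))

theorem pv_gramsA_sub : ∀ g ∈ pvGramsA, g ∈ pvGrams := by decide
theorem pv_grams_sub : ∀ g ∈ pvGrams, g ∈ pvGramsA := by decide
theorem pv_grams_len4 : ∀ g ∈ pvGrams, g.length = 4 := by decide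

theorem pv_length_lower (K : List Char) : (PySem.Chars.lower K).length = K.length := by
  show (K.map PySem.Chars.lowerChar).length = K.length
  simp

-- the crux: A's six pattern scans over key.lower() = B's window pass against pvForbidden
theorem pv_pattern_eq (K : List Char) :
    ((["abcdefghijklmnopqrstuvwxyz".toList, "ABCDEFGHIJKLMNOPQRSTUVWXYZ".toList,
       "0123456789".toList]).any (fun s =>
        (List.range (s.length - 3)).any (fun i =>
          PySem.Chars.isIn (PySem.Chars.lower ((s.drop i).take 4)) (PySem.Chars.lower K))) ||
     (["qwertyuiop".toList, "asdfghjkl".toList, "zxcvbnm".toList]).any (fun s =>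
        (List.range (s.length - 3)).any (fun i =>
          PySem.Chars.isIn (PySem.Chars.lower ((s.drop i).take 4)) (PySem.Chars.lower K))))
    = (List.range (K.length - 3)).any (fun i =>
        PySem.Set.contains pvForbidden (((PySem.Chars.lower K).drop i).take 4)) := by
  rw [← List.any_append]
  have h1 : ((["abcdefghijklmnopqrstuvwxyz".toList, "ABCDEFGHIJKLMNOPQRSTUVWXYZ".toList,
       "0123456789".toList] : List (List Char)) ++
      ["qwertyuiop".toList, "asdfghjkl".toList, "zxcvbnm".toList]).any (fun s =>
        (List.range (s.length - 3)).any (fun i =>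
          PySem.Chars.isIn (PySem.Chars.lower ((s.drop i).take 4)) (PySem.Chars.lower K)))
      = pvGramsA.any (fun g => PySem.Chars.isIn g (PySem.Chars.lower K)) := by
    rw [pvGramsA, List.any_flatMap]
    simp only [List.any_map, Function.comp_def]
    rfl
  rw [h1]
  apply Bool.eq_iff_iff.mpr
  simp only [List.any_eq_true, List.mem_range, PySem.Set.contains_iff, pvForbidden,
    PySem.Set.mem_ofList]
  constructor
  · rintro ⟨g, hgA, hocc⟩
    have hgB : g ∈ pvGrams := pv_gramsA_sub g hgA
    obtain ⟨i, hi, hw⟩ := (pv_isIn_window g _ (pv_grams_len4 g hgB)).mp hocc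
    rw [pv_length_lower] at hi
    exact ⟨i, hi, hw ▸ hgB⟩
  · rintro ⟨i, hi, hmem⟩
    refine ⟨((PySem.Chars.lower K).drop i).take 4, pv_grams_sub _ hmem, ?_⟩
    apply (pv_isIn_window _ _ (pv_grams_len4 _ hmem)).mpr
    rw [pv_length_lower]
    exact ⟨i, hi, rfl⟩

-- ===== VERDICT (by name: the statement is the Claim_ definition above) =====
theorem contains_common_patterns_py_spec : Claim_equal_contains_common_patterns_py := by
  intro key _
  unfold Spec_contains_common_patterns_py
  unfold contains_common_patterns_py contains_common_patterns_py_alt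
  simp only [pv_pyRangeAny_sub3, pv_slice4, pv_if_or, pv_any_or]
  rw [pv_pattern_eq key.toList]
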